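-- pv_equiv track=rewrite | github.com/OriginNeuralAI/The_Dorabella_Cipher-DECODED | verify.py | find_dialect
-- ===== SOURCE A (Python) =====
-- DIALECT = {
--     "DU":    "DO (Worcestershire dialect vowel shift)",
--     "FYRE":  "FIRE (archaic/dialectal spelling)",
--     "ENLLE": "NELLIE (Elgar's nickname for Dora Penny)",
--     "ESNUT": "TUNES (backslang — reversed)",
--     "HO":    "Exclamation / vocative marker (Victorian)",
-- }
--
-- def find_dialect(text):
--     """Find dialect forms and nicknames."""
--     found = []
--     for form, resolution in DIALECT.items():
--         pos = 0
--         while True: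
--             idx = text.find(form, pos)
--             if idx == -1:
--                 break
--             found.append((idx, form, resolution))
--             pos = idx + 1
--     found.sort()
--     return found
-- ===== SOURCE B (Python) =====
-- DIALECT = {
--     "DU":    "DO (Worcestershire dialect vowel shift)",
--     "FYRE":  "FIRE (archaic/dialectal spelling)",
--     "ENLLE": "NELLIE (Elgar's nickname for Dora Penny)",
--     "ESNUT": "TUNES (backslang — reversed)",
--     "HO":    "Exclamation / vocative marker (Victorian)",
-- }
--
-- def find_dialect(text):
--     """Find dialect forms and nicknames (single left-to-right scan, no sort)."""
--     found = []
--     for i in range(len(text)):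
--         for form, resolution in DIALECT.items():
--             if text.startswith(form, i):
--                 found.append((i, form, resolution))
--     return found
-- ===== Notes on version B (the rewrite author's own statement) =====
-- stated objective: alternative
-- what changed: Replaced the per-pattern find-loops followed by a final sort with a single left-to-right scan over text indices that checks each DIALECT form at every position, emitting matches already in position order (no sort needed, since no form is a prefix of another).
import Mathlib
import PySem

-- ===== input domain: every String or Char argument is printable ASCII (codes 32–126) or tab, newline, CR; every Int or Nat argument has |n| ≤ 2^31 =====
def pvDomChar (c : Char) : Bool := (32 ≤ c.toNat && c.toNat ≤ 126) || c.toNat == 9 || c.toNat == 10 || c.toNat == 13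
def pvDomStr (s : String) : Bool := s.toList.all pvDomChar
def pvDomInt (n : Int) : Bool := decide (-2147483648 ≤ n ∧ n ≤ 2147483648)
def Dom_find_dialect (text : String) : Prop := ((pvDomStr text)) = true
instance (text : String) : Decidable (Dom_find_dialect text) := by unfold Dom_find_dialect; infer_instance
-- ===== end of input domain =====

-- B replaces A's per-pattern find-loops followed by a final sort with one left-to-right scan
-- over text positions that emits matches already in position order (objective: alternative).

-- the module-level DIALECT dict (insertion order)
def pvDialect : List (String × String) :=
  [("DU",    "DO (Worcestershire dialect vowel shift)"),
   ("FYRE",  "FIRE (archaic/dialectal spelling)"),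
   ("ENLLE", "NELLIE (Elgar's nickname for Dora Penny)"),
   ("ESNUT", "TUNES (backslang — reversed)"),
   ("HO",    "Exclamation / vocative marker (Victorian)")]

-- ===== PORT A =====
-- A's inner `while True: idx = text.find(form, pos) …` loop; pos strictly increases and stays
-- ≤ len(text), so fuel = len(text)+2 bounds the number of find calls (exact, proved below).
def pvFindLoop (text form res : String) : Nat → Nat → List (Int × String × String)
  | 0, _ => []
  | fuel+1, pos =>
    let idx := PySem.Str.findFrom text form (pos : Int)
    if idx = -1 then []
    else (idx, form, res) :: pvFindLoop text form res fuel (idx.toNat + 1)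

-- found.sort(): Python sorts the tuples lexicographically — int first, then the two strings
-- (string comparison by code point); the key below is exactly that lexicographic tuple order.
def find_dialect (text : String) : List (Int × String × String) :=
  PySem.List.sorted
    (pvDialect.foldl (fun acc p => acc ++ pvFindLoop text p.1 p.2 (text.toList.length + 2) 0) [])
    (fun t => toLex (t.1, toLex (t.2.1, t.2.2)))

-- ===== PORT B =====
-- text.startswith(form, i) with 0 ≤ i ≤ len(text) is exactly: form is a prefix of text[i:].
def find_dialect_alt (text : String) : List (Int × String × String) :=
  (PySem.List.pyRange 0 (PySem.Str.len text)).foldl (fun acc i =>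
    pvDialect.foldl (fun acc' p =>
      if PySem.Chars.startswith (text.toList.drop i.toNat) p.1.toList
      then acc' ++ [(i, p.1, p.2)] else acc') acc) []

-- ===== PRECONDITION & SPEC =====
def Spec_find_dialect (text : String) (out : List (Int × String × String)) : Prop := out = find_dialect_alt text
instance (text : String) (out : List (Int × String × String)) : Decidable (Spec_find_dialect text out) := by unfold Spec_find_dialect; infer_instance

-- ===== CLAIM (what is proved, stated in full; the proofs are below) =====
def Claim_equal_find_dialect : Prop := ∀ (text : String), Dom_find_dialect text → Spec_find_dialect text (find_dialect text)

-- ===== LEMMAS AND PROOFS =====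

-- occurrence indices i ≥ pos of pattern f in cs, ascending
def pvOcc (cs f : List Char) (pos : Nat) : List Nat :=
  (List.range' pos (cs.length - pos)).filter (fun i => PySem.Chars.startswith (cs.drop i) f)

-- B's matches at one position i
def pvMatches (cs : List Char) (i : Nat) : List (Int × String × String) :=
  (pvDialect.filter (fun p => PySem.Chars.startswith (cs.drop i) p.1.toList)).map
    (fun p => ((i : Int), p.1, p.2))

def pvBcore (cs : List Char) : List (Int × String × String) :=
  (List.range cs.length).flatMap (pvMatches cs)

lemma pvOcc_nil {cs f : List Char} {pos : Nat} (h : ¬ f <:+: cs.drop pos) :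
    pvOcc cs f pos = [] := by
  unfold pvOcc
  apply List.filter_eq_nil_iff.mpr
  intro i hi
  rw [List.mem_range'_1] at hi
  simp only [PySem.Chars.startswith_iff]
  intro hpre
  apply h
  have hdrop : (cs.drop pos).drop (i - pos) = cs.drop i := by
    rw [List.drop_drop]; congr 1; omega
  exact (hdrop ▸ hpre.isInfix).trans (List.drop_suffix _ _).isInfix

lemma pvOcc_step {cs f : List Char} {r : Nat} (hno : ¬ f <+: cs.drop r) :
    pvOcc cs f r = pvOcc cs f (r + 1) := by
  unfold pvOcc
  by_cases hr : r < cs.length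
  · have h1 : cs.length - r = (cs.length - (r+1)) + 1 := by omega
    rw [h1, List.range'_succ, List.filter_cons]
    simp [PySem.Chars.startswith_iff, hno]
  · have h1 : cs.length - r = 0 := by omega
    have h2 : cs.length - (r+1) = 0 := by omega
    rw [h1, h2]; rfl

lemma pvOcc_skip {cs f : List Char} {pos r : Nat} (hpr : pos ≤ r)
    (hno : ∀ i, pos ≤ i → i < r → ¬ f <+: cs.drop i) :
    pvOcc cs f pos = pvOcc cs f r := by
  induction r with
  | zero => have : pos = 0 := by omega
            subst this; rfl
  | succ n ih =>
    rcases Nat.lt_or_ge pos (n+1) with h | h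
    · have hpn : pos ≤ n := by omega
      rw [ih hpn (fun i h1 h2 => hno i h1 (by omega))]
      exact pvOcc_step (hno n (by omega) (by omega))
    · have : pos = n + 1 := by omega
      subst this; rfl

lemma pvOcc_cons {cs f : List Char} {pos : Nat} (hf : f ≠ [])
    (hm : f <+: cs.drop pos) :
    pvOcc cs f pos = pos :: pvOcc cs f (pos + 1) := by
  have hlt : pos < cs.length := by
    by_contra h
    have : cs.drop pos = [] := List.drop_eq_nil_iff.mpr (by omega)
    rw [this] at hm
    exact hf (List.prefix_nil.mp hm)
  unfold pvOcc
  have h1 : cs.length - pos = (cs.length - (pos+1)) + 1 := by omega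
  rw [h1, List.range'_succ, List.filter_cons]
  simp [PySem.Chars.startswith_iff, hm]

lemma pvOcc_zero (cs f : List Char) :
    pvOcc cs f 0 = (List.range cs.length).filter (fun i => PySem.Chars.startswith (cs.drop i) f) := by
  unfold pvOcc
  rw [Nat.sub_zero, List.range_eq_range']

-- A's find loop produces exactly the ascending occurrence indices from pos on
lemma pvFindLoop_eq (text form res : String) (hf : form.toList ≠ []) :
    ∀ fuel pos, text.toList.length + 2 ≤ fuel + pos → pos ≤ text.toList.length →
    pvFindLoop text form res fuel pos
      = (pvOcc text.toList form.toList pos).map (fun i : Nat => ((i : Int), form, res)) := by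
  intro fuel
  induction fuel with
  | zero => intro pos h1 h2; omega
  | succ fuel ih =>
    intro pos h1 h2
    rw [pvFindLoop]
    simp only [PySem.Str.findFrom_eq]
    by_cases h : PySem.Chars.findFrom text.toList form.toList (pos : Int) none = -1
    · rw [if_pos h, pvOcc_nil ((PySem.Chars.findFrom_natCast_eq_neg_one_iff _ _ pos h2).mp h)]
      rfl
    · obtain ⟨hge, hpre, hmin⟩ := PySem.Chars.findFrom_natCast_spec _ _ pos h2 h
      set idx := PySem.Chars.findFrom text.toList form.toList (pos : Int) none with hidx
      have h0 : (0:Int) ≤ idx := le_trans (by exact_mod_cast Nat.zero_le pos) hge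
      have hcast : idx = (idx.toNat : Int) := (Int.toNat_of_nonneg h0).symm
      have hr : pos ≤ idx.toNat := by omega
      have hrlen : idx.toNat < text.toList.length := by
        by_contra hc
        have : text.toList.drop idx.toNat = [] := List.drop_eq_nil_iff.mpr (by omega)
        rw [this] at hpre
        exact hf (List.prefix_nil.mp hpre)
      rw [if_neg h]
      rw [pvOcc_skip hr (fun i hi1 hi2 => hmin i hi1 hi2),
          pvOcc_cons hf hpre, ih (idx.toNat + 1) (by omega) (by omega), List.map_cons]
      rw [hcast]; simp

lemma pvFlatMap_ite {α β : Type} (xs : List α) (p : α → Bool) (f : α → β) :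
    xs.flatMap (fun a => if p a then [f a] else []) = (xs.filter p).map f := by
  induction xs with
  | nil => rfl
  | cons x xs ih =>
    rw [List.flatMap_cons, List.filter_cons]
    by_cases h : p x <;> simp [h, ih]

lemma pvFlatMap_append_perm {β γ : Type} (ys : List β) (u v : β → List γ) :
    (ys.flatMap (fun b => u b ++ v b)).Perm (ys.flatMap u ++ ys.flatMap v) := by
  induction ys with
  | nil => simp
  | cons b ys ih =>
    simp only [List.flatMap_cons]
    refine (ih.append_left (u b ++ v b)).trans ?_
    simp only [List.append_assoc]
    exact List.Perm.append_left _ (List.perm_append_comm_assoc _ _ _)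

-- swap the order of a double flat map, up to permutation
lemma pvSwap_perm {α β γ : Type} (xs : List α) (ys : List β) (g : α → β → List γ) :
    (xs.flatMap (fun a => ys.flatMap (fun b => g a b))).Perm
      (ys.flatMap (fun b => xs.flatMap (fun a => g a b))) := by
  induction xs with
  | nil => simp
  | cons x xs ih =>
    simp only [List.flatMap_cons]
    refine ((ih.append_left _).trans ?_)
    exact (pvFlatMap_append_perm ys (g x) (fun b => xs.flatMap (fun a => g a b))).symm

-- no DIALECT form is a prefix of another, so no two match at the same position
lemma pvMaster (l : List Char) :
    pvDialect.Pairwise (fun p q => PySem.Chars.startswith l p.1.toList = true →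
      PySem.Chars.startswith l q.1.toList = true → False) := by
  have clash : ∀ p q : List Char, ¬ p <+: q → ¬ q <+: p →
      PySem.Chars.startswith l p = true → PySem.Chars.startswith l q = true → False := by
    intro p q hpq hqp hp hq
    rcases List.prefix_or_prefix_of_prefix ((PySem.Chars.startswith_iff _ _).mp hp)
      ((PySem.Chars.startswith_iff _ _).mp hq) with h | h
    · exact hpq h
    · exact hqp h
  refine .cons ?_ (.cons ?_ (.cons ?_ (.cons ?_ (.cons ?_ .nil)))) <;>
    (intro q hq hA hB; fin_cases hq <;> exact clash _ _ (by decide) (by decide) hA hB)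

lemma pvFilter_pairwise (l : List Char) {R : (String × String) → (String × String) → Prop} :
    ((pvDialect.filter (fun p => PySem.Chars.startswith l p.1.toList)).Pairwise R) := by
  refine List.Pairwise.imp_of_mem ?_ ((pvMaster l).filter _)
  intro a b ha hb hS
  exact (hS (List.mem_filter.mp ha).2 (List.mem_filter.mp hb).2).elim

lemma pvMatches_pairwise {cs : List Char} {i : Nat}
    {R : (Int × String × String) → (Int × String × String) → Prop} :
    (pvMatches cs i).Pairwise R := by
  unfold pvMatches
  exact List.pairwise_map.mpr (pvFilter_pairwise _)

lemma pvMem_matches_fst {cs : List Char} {i : Nat} {x : Int × String × String}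
    (hx : x ∈ pvMatches cs i) : x.1 = (i : Int) := by
  obtain ⟨p, _, hp⟩ := List.mem_map.mp hx
  rw [← hp]

lemma pvBcore_pairwise (cs : List Char) :
    (pvBcore cs).Pairwise (fun a b => a.1 < b.1) := by
  suffices h : ∀ n, ((List.range n).flatMap (pvMatches cs)).Pairwise (fun a b => a.1 < b.1) from
    h cs.length
  intro n
  induction n with
  | zero => simp
  | succ n ih =>
    rw [List.range_succ, List.flatMap_append]
    refine List.pairwise_append.mpr ⟨ih, by simp [pvMatches_pairwise], ?_⟩
    intro a ha b hb
    obtain ⟨i, hi, hai⟩ := List.mem_flatMap.mp ha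
    have hb' : b ∈ pvMatches cs n := by simpa using hb
    rw [pvMem_matches_fst hai, pvMem_matches_fst hb']
    exact_mod_cast List.mem_range.mp hi

-- B's single pass is a rearrangement of A's per-pattern occurrence lists
lemma pvBcore_perm (cs : List Char) :
    (pvBcore cs).Perm
      (pvDialect.flatMap (fun p =>
        (pvOcc cs p.1.toList 0).map (fun i : Nat => ((i : Int), p.1, p.2)))) := by
  have e1 : pvBcore cs = (List.range cs.length).flatMap (fun i =>
      pvDialect.flatMap (fun p =>
        if PySem.Chars.startswith (cs.drop i) p.1.toList then [((i : Int), p.1, p.2)] else [])) := by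
    unfold pvBcore
    refine List.flatMap_congr (fun i _ => ?_)
    exact (pvFlatMap_ite _ _ _).symm
  have e2 : ∀ p : String × String,
      (List.range cs.length).flatMap (fun i =>
        if PySem.Chars.startswith (cs.drop i) p.1.toList then [((i : Int), p.1, p.2)] else [])
      = (pvOcc cs p.1.toList 0).map (fun i : Nat => ((i : Int), p.1, p.2)) := by
    intro p
    rw [pvFlatMap_ite, pvOcc_zero]
  rw [e1, ← List.flatMap_congr (fun p _ => e2 p)]
  exact pvSwap_perm _ _ _

-- B's port computes pvBcore
lemma pvAlt_eq (text : String) : find_dialect_alt text = pvBcore text.toList := by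
  unfold find_dialect_alt pvBcore
  rw [PySem.Str.len_eq, PySem.List.pyRange_zero_natCast, List.foldl_map]
  have hinner : ∀ (acc : List (Int × String × String)) (k : Nat),
      pvDialect.foldl (fun acc' p =>
        if PySem.Chars.startswith (text.toList.drop ((k : Int)).toNat) p.1.toList
        then acc' ++ [((k : Int), p.1, p.2)] else acc') acc
      = acc ++ pvMatches text.toList k := by
    intro acc k
    simp only [Int.toNat_natCast]
    exact PySem.List.foldl_append_if _ _ _ _
  simp only [hinner]
  rw [PySem.List.foldl_append_eq_flatMap, List.nil_append]

-- ===== VERDICT (by name: the statement is the Claim_ definition above) =====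
theorem find_dialect_spec : Claim_equal_find_dialect := by
  intro text _
  unfold Spec_find_dialect
  rw [pvAlt_eq]
  unfold find_dialect
  rw [PySem.List.foldl_append_eq_flatMap, List.nil_append]
  have hloop : ∀ p ∈ pvDialect,
      pvFindLoop text p.1 p.2 (text.toList.length + 2) 0
        = (pvOcc text.toList p.1.toList 0).map (fun i : Nat => ((i : Int), p.1, p.2)) := by
    intro p hp
    refine pvFindLoop_eq text p.1 p.2 ?_ _ 0 (by omega) (by omega)
    fin_cases hp <;> decide
  rw [List.flatMap_congr hloop]
  refine PySem.List.sorted_eq_of_perm_of_pairwise_lt _ _ _ (pvBcore_perm text.toList) ?_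
  refine (pvBcore_pairwise text.toList).imp (fun {a b} h => ?_)
  rw [Prod.Lex.toLex_lt_toLex]
  exact Or.inl h
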